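-- pv_equiv track=rewrite | github.com/heirish/machine-learning-portfolio | projects/LogPatternReco/Modules/HC.py | remove_excessive_duplicates
-- ===== SOURCE A (Python) =====
-- def remove_excessive_duplicates(iterable, dup='', max_dup=2):
--     """Generate items in iterable, but at most max_dup of any consecutive
--     sequence of items equal to dup.
--
--     >>> input = [1, 0, 0, 0, 2, 0, 3, 0, 0, 0, 0, 0, 4, 0]
--     >>> list(remove_excessive_duplicates(input, dup=0))
--     [1, 0, 0, 2, 0, 3, 0, 0, 4, 0]
--
--     """
--     count = 0
--     lastitem = None
--     #最后一个空格，不要替换掉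
--     for item in iterable:
--         if item == dup or item == ' ':
--             count += 1
--         else:
--             count = 0
--             #if lastitem == ' ':
--             #    yield lastitem
--         #lastitem = item
--         if count <= max_dup:
--             yield item
-- ===== SOURCE B (Python) =====
-- def remove_excessive_duplicates(iterable, dup='', max_dup=2):
--     """Generate items in iterable, but at most max_dup of any consecutive
--     sequence of items equal to dup (or ' ').
--
--     Sliding-window formulation: materialize the input once, mark which
--     items are 'special' (== dup or == ' '), then keep the item at index i
--     unless the whole window of the max_dup+1 special-flags ending at i is
--     all True (i.e. the special run ending at i is already longer than
--     max_dup).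
--     """
--     items = list(iterable)
--     special = [x == dup or x == ' ' for x in items]
--     for i, x in enumerate(items):
--         if not (i >= max_dup and all(special[i - max_dup:i + 1])):
--             yield x
-- ===== Notes on version B (the rewrite author's own statement) =====
-- stated objective: alternative
-- what changed: Replaces A's streaming run counter with a two-stage sliding-window filter: materialize the input, precompute a special-flag list, and keep item i unless the window of max_dup+1 flags ending at i is all set.
import Mathlib
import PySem

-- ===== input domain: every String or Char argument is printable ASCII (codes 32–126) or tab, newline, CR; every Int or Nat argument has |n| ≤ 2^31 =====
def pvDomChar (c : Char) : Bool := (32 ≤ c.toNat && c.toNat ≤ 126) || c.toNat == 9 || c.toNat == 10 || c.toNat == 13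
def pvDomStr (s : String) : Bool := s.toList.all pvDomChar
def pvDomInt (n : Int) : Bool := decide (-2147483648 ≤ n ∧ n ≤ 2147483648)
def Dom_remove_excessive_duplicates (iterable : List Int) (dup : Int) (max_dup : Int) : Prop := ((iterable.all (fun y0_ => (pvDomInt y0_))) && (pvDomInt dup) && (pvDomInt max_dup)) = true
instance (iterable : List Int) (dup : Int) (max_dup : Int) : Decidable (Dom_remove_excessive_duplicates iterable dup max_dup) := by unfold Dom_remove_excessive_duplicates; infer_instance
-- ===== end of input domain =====

-- B replaces A's streaming run counter by a two-stage sliding-window filter: it first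
-- marks which items are special, then keeps item i unless the whole window of the
-- max_dup+1 special-flags ending at i is all set (return value equivalence; A is lazy,
-- B materializes the iterable first).


-- ===== PORT A =====
-- A's generator loop: `count` counts the current run of items equal to dup; an item is
-- yielded iff count ≤ max_dup after updating.  (The `item == ' '` test is always False
-- for int items and the `lastitem` variable is dead code, so neither appears here.)
def goA (iterable : List Int) (dup : Int) (max_dup : Int) (count : Int) : List Int :=
  match iterable with
  | [] => []
  | item :: rest =>
    let count' := if item = dup then count + 1 else 0
    (if count' ≤ max_dup then [item] else []) ++ goA rest dup max_dup count'

def remove_excessive_duplicates (iterable : List Int) (dup : Int) (max_dup : Int) : List Int :=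
  goA iterable dup max_dup 0

-- ===== PORT B =====
-- B: materialize, mark special items (item == ' ' is always False on ints), then keep
-- the item at index i unless i >= max_dup and special[i-max_dup:i+1] is all True.
def remove_excessive_duplicates_alt (iterable : List Int) (dup : Int) (max_dup : Int) : List Int :=
  let items := iterable
  let special := items.map (fun x => x == dup)
  ((PySem.List.enumerate items 0).filter
      (fun p => !(decide (max_dup ≤ p.1) &&
        (PySem.List.slice special (some (p.1 - max_dup)) (some (p.1 + 1))).all id))).map Prod.snd

-- ===== PRECONDITION & SPEC =====
def Spec_remove_excessive_duplicates (iterable : List Int) (dup : Int) (max_dup : Int) (out : List Int) : Prop := out = remove_excessive_duplicates_alt iterable dup max_dup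
instance (iterable : List Int) (dup : Int) (max_dup : Int) (out : List Int) : Decidable (Spec_remove_excessive_duplicates iterable dup max_dup out) := by unfold Spec_remove_excessive_duplicates; infer_instance

-- ===== CLAIM (what is proved, stated in full; the proofs are below) =====
def Claim_equal_remove_excessive_duplicates : Prop := ∀ (iterable : List Int) (dup : Int) (max_dup : Int), Dom_remove_excessive_duplicates iterable dup max_dup → Spec_remove_excessive_duplicates iterable dup max_dup (remove_excessive_duplicates iterable dup max_dup)

-- ===== LEMMAS AND PROOFS =====

-- Length of the special run at the end of the already-processed prefix p:
-- this is exactly A's counter value after processing p.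
def runEnd (dup : Int) (p : List Int) : Int :=
  ((p.reverse.takeWhile (fun y => y == dup)).length : Int)

theorem runEnd_nonneg (dup : Int) (p : List Int) : 0 ≤ runEnd dup p := by
  unfold runEnd; positivity

theorem runEnd_le_length (dup : Int) (p : List Int) : runEnd dup p ≤ (p.length : Int) := by
  unfold runEnd
  have := (List.takeWhile_prefix (p := fun y : Int => y == dup) (l := p.reverse)).length_le
  simp at this ⊢
  omega

theorem runEnd_snoc (dup : Int) (p : List Int) (x : Int) :
    runEnd dup (p ++ [x]) = if x = dup then runEnd dup p + 1 else 0 := by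
  unfold runEnd
  rw [List.reverse_append]
  by_cases hx : x = dup
  · simp [hx]
  · simp [hx]

-- (take k m).all pB ↔ the takeWhile prefix is at least k long (for k ≤ |m|).
theorem all_take_iff_takeWhile (pB : Int → Bool) :
    ∀ (m : List Int) (k : Nat), k ≤ m.length →
      ((m.take k).all pB = true ↔ k ≤ (m.takeWhile pB).length) := by
  intro m
  induction m with
  | nil =>
    intro k hk
    have : k = 0 := Nat.le_zero.mp (by simpa using hk)
    subst this; simp
  | cons y m' ih =>
    intro k hk
    cases k with
    | zero => simp
    | succ k' =>
      by_cases hy : pB y = true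
      · simp only [List.take_succ_cons, List.all_cons, hy, Bool.true_and,
          List.takeWhile_cons_of_pos hy, List.length_cons]
        rw [ih k' (by simpa using hk)]
        omega
      · simp [hy, List.takeWhile_cons_of_neg (by simpa using hy)]

-- The last k items of l are all pB iff the special run at the end of l is ≥ k.
theorem all_drop_iff (pB : Int → Bool) (l : List Int) (k : Nat) (hk : k ≤ l.length) :
    ((l.drop (l.length - k)).all pB = true ↔ k ≤ (l.reverse.takeWhile pB).length) := by
  have h1 : (l.drop (l.length - k)).reverse = l.reverse.take k := by
    rw [List.reverse_drop]
    congr 1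
    omega
  have h2 : (l.drop (l.length - k)).all pB = (l.reverse.take k).all pB := by
    rw [← h1, List.all_reverse]
  rw [h2, all_take_iff_takeWhile pB l.reverse k (by simpa using hk)]

-- KEY: B's drop-condition at index s = |p| (on any list p ++ x :: rest) holds exactly
-- when A's updated counter there, runEnd dup (p ++ [x]), exceeds max_dup.
theorem drop_cond_iff (dup max_dup : Int) (p : List Int) (x : Int) (rest : List Int) :
    ((max_dup ≤ (p.length : Int)) ∧
      ((PySem.List.slice ((p ++ x :: rest).map (fun y => y == dup))
          (some ((p.length : Int) - max_dup)) (some ((p.length : Int) + 1))).all id = true))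
      ↔ max_dup < runEnd dup (p ++ [x]) := by
  by_cases hmd : 0 ≤ max_dup
  · by_cases hg : max_dup ≤ (p.length : Int)
    · -- guard holds: the window is the last max_dup+1 items of p ++ [x]
      have ha : (0:Int) ≤ (p.length : Int) - max_dup := by omega
      rw [PySem.List.slice_toNat _ ha (by omega)]
      have hB' : ((p.length : Int) + 1).toNat - ((p.length : Int) - max_dup).toNat
          = max_dup.toNat + 1 := by omega
      have hA : ((p.length : Int) - max_dup).toNat = p.length - max_dup.toNat := by omega
      rw [hB', hA]
      have hdrop : ((p ++ x :: rest).map (fun y => y == dup)).drop (p.length - max_dup.toNat)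
          = ((p.drop (p.length - max_dup.toNat)) ++ x :: rest).map (fun y => y == dup) := by
        rw [← List.map_drop, List.drop_append_of_le_length (by omega)]
      have hlen : (p.drop (p.length - max_dup.toNat)).length = max_dup.toNat := by
        simp; omega
      have htake : (((p.drop (p.length - max_dup.toNat)) ++ x :: rest).map
            (fun y => y == dup)).take (max_dup.toNat + 1)
          = ((p.drop (p.length - max_dup.toNat)) ++ [x]).map (fun y => y == dup) := by
        rw [← List.map_take, List.take_append, hlen]
        simp
        omega
      rw [hdrop, htake]
      have hwin : (p.drop (p.length - max_dup.toNat)) ++ [x]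
          = (p ++ [x]).drop ((p ++ [x]).length - (max_dup.toNat + 1)) := by
        rw [List.drop_append_of_le_length (by simp)]
        congr 2
        simp
      have hall : (((p.drop (p.length - max_dup.toNat)) ++ [x]).map
            (fun y => y == dup)).all id
          = ((p ++ [x]).drop ((p ++ [x]).length - (max_dup.toNat + 1))).all
              (fun y => y == dup) := by
        rw [hwin, List.all_map]
        rfl
      rw [hall]
      rw [all_drop_iff (fun y => y == dup) (p ++ [x]) (max_dup.toNat + 1) (by simp; omega)]
      unfold runEnd
      constructor
      · rintro ⟨-, h⟩; omega
      · intro h; exact ⟨hg, by omega⟩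
    · -- guard fails; and the counter cannot exceed max_dup since the run is ≤ |p|+1
      have h1 := runEnd_le_length dup (p ++ [x])
      simp only [List.length_append, List.length_cons, List.length_nil] at h1
      constructor
      · rintro ⟨h, -⟩; exact absurd h hg
      · intro h; push_cast at h1; omega
  · -- max_dup < 0: the slice is empty (start past stop), so B drops; A's counter is ≥ 0
    have hg : max_dup ≤ (p.length : Int) := by omega
    have ha : (0:Int) ≤ (p.length : Int) - max_dup := by omega
    rw [PySem.List.slice_toNat _ ha (by omega)]
    have h0 : ((p.length : Int) + 1).toNat - ((p.length : Int) - max_dup).toNat = 0 := by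
      omega
    rw [h0]
    have := runEnd_nonneg dup (p ++ [x])
    simp only [List.take_zero, List.all_nil]
    constructor
    · intro _; omega
    · intro _; exact ⟨hg, trivial⟩

-- MAIN: A's tail loop, started with counter runEnd dup p, produces exactly B's filter
-- restricted to the indices ≥ |p| of the full list p ++ t.
theorem goA_eq_filter (dup max_dup : Int) :
    ∀ (t p : List Int),
      goA t dup max_dup (runEnd dup p)
        = ((PySem.List.enumerate t (p.length : Int)).filter
            (fun q => !(decide (max_dup ≤ q.1) &&
              (PySem.List.slice ((p ++ t).map (fun y => y == dup))
                (some (q.1 - max_dup)) (some (q.1 + 1))).all id))).map Prod.snd := by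
  intro t
  induction t with
  | nil => intro p; simp [goA, PySem.List.enumerate]
  | cons x rest ih =>
    intro p
    rw [PySem.List.enumerate_cons]
    have hcount : (if x = dup then runEnd dup p + 1 else 0) = runEnd dup (p ++ [x]) :=
      (runEnd_snoc dup p x).symm
    have hcond : (!(decide (max_dup ≤ ((p.length : Int), x).1) &&
          (PySem.List.slice ((p ++ x :: rest).map (fun y => y == dup))
            (some (((p.length : Int), x).1 - max_dup))
            (some (((p.length : Int), x).1 + 1))).all id))
        = decide (runEnd dup (p ++ [x]) ≤ max_dup) := by
      rcases drop_cond_iff dup max_dup p x rest with ⟨h1, h2⟩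
      by_cases h : max_dup < runEnd dup (p ++ [x])
      · obtain ⟨hg, hs⟩ := h2 h
        rw [show (((p.length : Int), x).1 : Int) = (p.length : Int) from rfl, hs]
        simp [hg]
        omega
      · have hR : runEnd dup (p ++ [x]) ≤ max_dup := not_lt.mp h
        rw [show (((p.length : Int), x).1 : Int) = (p.length : Int) from rfl]
        by_cases hg : max_dup ≤ (p.length : Int)
        · have hs : (PySem.List.slice ((p ++ x :: rest).map (fun y => y == dup))
              (some ((p.length : Int) - max_dup)) (some ((p.length : Int) + 1))).all id = false := by
            rcases Bool.eq_false_or_eq_true ((PySem.List.slice ((p ++ x :: rest).map (fun y => y == dup))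
              (some ((p.length : Int) - max_dup)) (some ((p.length : Int) + 1))).all id) with hb | hb
            · exact absurd (h1 ⟨hg, hb⟩) h
            · exact hb
          rw [hs]
          simp [hR]
        · simp [hg, hR]
    have hrec : goA rest dup max_dup (runEnd dup (p ++ [x]))
        = ((PySem.List.enumerate rest ((p.length : Int) + 1)).filter
            (fun q => !(decide (max_dup ≤ q.1) &&
              (PySem.List.slice ((p ++ x :: rest).map (fun y => y == dup))
                (some (q.1 - max_dup)) (some (q.1 + 1))).all id))).map Prod.snd := by
      have := ih (p ++ [x])
      rw [List.append_assoc] at this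
      simpa using this
    simp only [goA, hcount, List.filter_cons, hcond]
    by_cases hk : runEnd dup (p ++ [x]) ≤ max_dup
    · simp only [hk, decide_true, if_true, List.map_cons, List.singleton_append, hrec]
    · simp only [hk, decide_false, if_false, Bool.false_eq_true, List.nil_append, hrec]

-- ===== VERDICT (by name: the statement is the Claim_ definition above) =====
theorem remove_excessive_duplicates_spec : Claim_equal_remove_excessive_duplicates := by
  intro iterable dup max_dup _
  unfold Spec_remove_excessive_duplicates remove_excessive_duplicates
    remove_excessive_duplicates_alt
  have := goA_eq_filter dup max_dup iterable []
  simpa [runEnd] using this
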